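-- pv_equiv track=rewrite | github.com/piotr-kalemba/Anagrams-Generator | generate_anagrams.py | fit_in
-- ===== SOURCE A (Python) =====
-- from collections import Counter
--
-- def fit_in(word, name):
--     """the boolean function that checks for every character in 'word' parameter if it occurs in the 'name' parameter
--     at least as many times as it does in 'word' -
--     if this is the case the function returns True, otherwise it returns False """
--     name_map = Counter(name)
--     word_map = Counter(word)
--     for letter in word:
--         if letter not in name_map:
--             return False
--         if name_map[letter] < word_map[letter]:
--             return False
--     return True
-- ===== SOURCE B (Python) =====
-- def fit_in(word, name):
--     """True iff every letter of 'word' occurs in 'name' at least as often.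
--     Consuming-pool algorithm: repeatedly remove each letter of word from a
--     pool of name's letters; failure to remove means the letter is exhausted."""
--     pool = list(name)
--     for letter in word:
--         try:
--             pool.remove(letter)
--         except ValueError:
--             return False
--     return True
-- ===== Notes on version B (the rewrite author's own statement) =====
-- stated objective: alternative
-- what changed: Replaces A's count-both-then-compare approach by a consuming-pool algorithm: no counting at all, each letter of word removes one occurrence from a mutable pool of name's letters, failing as soon as removal is impossible.
import Mathlib
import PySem

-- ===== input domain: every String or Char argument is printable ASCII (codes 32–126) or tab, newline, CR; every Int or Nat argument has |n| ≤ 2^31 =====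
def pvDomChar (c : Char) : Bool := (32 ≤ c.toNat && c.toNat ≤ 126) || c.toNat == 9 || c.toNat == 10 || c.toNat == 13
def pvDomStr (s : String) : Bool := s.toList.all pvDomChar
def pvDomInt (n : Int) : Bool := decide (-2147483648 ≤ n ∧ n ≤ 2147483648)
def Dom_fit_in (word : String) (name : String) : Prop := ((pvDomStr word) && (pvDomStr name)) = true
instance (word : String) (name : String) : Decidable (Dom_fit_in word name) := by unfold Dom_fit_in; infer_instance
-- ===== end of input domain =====

-- B replaces A's count-both-then-compare approach by a consuming-pool algorithm (no counting): alternative decomposition, same return value.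

-- ===== PORT A =====
-- the 'for letter in word' loop with its two early 'return False' branches
def fitInLoop (name_map word_map : PySem.Dict Char Int) : List Char → Bool
  | [] => true
  | letter :: rest =>
    if ¬ (name_map.contains letter) then false
    else if name_map.getD letter 0 < word_map.getD letter 0 then false
    else fitInLoop name_map word_map rest

def fit_in (word : String) (name : String) : Bool :=
  let name_map := PySem.Dict.counter name.toList
  let word_map := PySem.Dict.counter word.toList
  fitInLoop name_map word_map word.toList

-- ===== PORT B =====
-- the consuming loop: pool.remove(letter) (none = ValueError → return False)
def fitAltLoop (pool : List Char) : List Char → Bool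
  | [] => true
  | letter :: rest =>
    match PySem.List.remove? pool letter with
    | none => false
    | some p => fitAltLoop p rest

def fit_in_alt (word : String) (name : String) : Bool :=
  fitAltLoop name.toList word.toList

-- ===== PRECONDITION & SPEC =====
def Spec_fit_in (word : String) (name : String) (out : Bool) : Prop := out = fit_in_alt word name
instance (word : String) (name : String) (out : Bool) : Decidable (Spec_fit_in word name out) := by unfold Spec_fit_in; infer_instance

-- ===== CLAIM (what is proved, stated in full; the proofs are below) =====
def Claim_equal_fit_in : Prop := ∀ (word : String) (name : String), Dom_fit_in word name → Spec_fit_in word name (fit_in word name)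

-- ===== LEMMAS AND PROOFS =====

-- A's loop, over letters all drawn from w, decides the pointwise count condition.
theorem fitInLoop_eq (w n : List Char) (l : List Char) (hsub : ∀ c ∈ l, c ∈ w) :
    fitInLoop (PySem.Dict.counter n) (PySem.Dict.counter w) l
      = decide (∀ c ∈ l, (w.count c : Int) ≤ (n.count c : Int)) := by
  induction l with
  | nil => simp [fitInLoop]
  | cons c rest ih =>
    have hcw : c ∈ w := hsub c (List.mem_cons_self ..)
    have hrest := ih (fun x hx => hsub x (List.mem_cons_of_mem _ hx))
    simp only [fitInLoop, PySem.Dict.contains_counter, PySem.Dict.getD_counter]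
    by_cases hc : c ∈ n
    · simp only [List.contains_iff_mem, hc, not_true, if_false]
      by_cases hlt : (n.count c : Int) < (w.count c : Int)
      · have hall : ¬ (∀ x ∈ c :: rest, (w.count x : Int) ≤ (n.count x : Int)) :=
          fun h => absurd (h c (List.mem_cons_self ..)) (not_le.mpr hlt)
        rw [if_pos hlt, eq_comm]
        exact decide_eq_false hall
      · simp only [hlt, if_false, hrest]
        simp only [List.forall_mem_cons, not_lt.mp hlt, true_and]
    · have hn0 : n.count c = 0 := List.count_eq_zero.mpr hc
      have hw1 : 1 ≤ w.count c := List.one_le_count_iff.mpr hcw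
      have hcc : ¬ ((w.count c : Int) ≤ (n.count c : Int)) := by
        rw [hn0]; push_cast; omega
      have hall : ¬ (∀ x ∈ c :: rest, (w.count x : Int) ≤ (n.count x : Int)) :=
        fun h => hcc (h c (List.mem_cons_self ..))
      have hcf : ¬ (n.contains c = true) := by simp [hc]
      rw [if_pos hcf, eq_comm]
      exact decide_eq_false hall

-- B's consuming loop decides multiset containment of l in the pool.
theorem fitAltLoop_eq (l pool : List Char) :
    fitAltLoop pool l = decide (∀ c, l.count c ≤ pool.count c) := by
  induction l generalizing pool with
  | nil => simp [fitAltLoop]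
  | cons c rest ih =>
    by_cases hc : c ∈ pool
    · rw [fitAltLoop, PySem.List.remove?_eq_some_erase _ _ hc]
      show fitAltLoop (pool.erase c) rest = _
      rw [ih]
      have h1 : 1 ≤ pool.count c := List.one_le_count_iff.mpr hc
      rw [Bool.eq_iff_iff, decide_eq_true_iff, decide_eq_true_iff]
      constructor
      · intro h x
        have hx := h x
        rw [List.count_erase] at hx
        rw [List.count_cons]
        by_cases hxc : c = x
        · subst hxc; simp only [BEq.rfl, if_pos] at hx ⊢; omega
        · have : (c == x) = false := beq_eq_false_iff_ne.mpr hxc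
          simp only [this, Bool.false_eq_true, if_false, Nat.sub_zero, if_neg] at hx ⊢
          omega
      · intro h x
        have hx := h x
        rw [List.count_cons] at hx
        rw [List.count_erase]
        by_cases hxc : c = x
        · subst hxc; simp only [BEq.rfl, if_pos] at hx ⊢; omega
        · have : (c == x) = false := beq_eq_false_iff_ne.mpr hxc
          simp only [this, Bool.false_eq_true, if_false, Nat.sub_zero, if_neg] at hx ⊢
          omega
    · rw [fitAltLoop, (PySem.List.remove?_eq_none_iff _ _).mpr hc, eq_comm]
      refine decide_eq_false fun h => ?_
      have h1 := h c
      have h2 : pool.count c = 0 := List.count_eq_zero.mpr hc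
      have h3 : (c :: rest).count c = rest.count c + 1 := by simp [List.count_cons]
      omega
  
-- ===== VERDICT (by name: the statement is the Claim_ definition above) =====
theorem fit_in_spec : Claim_equal_fit_in := by
  intro word name _
  unfold Spec_fit_in fit_in fit_in_alt
  rw [fitAltLoop_eq, fitInLoop_eq word.toList name.toList word.toList (fun _ h => h)]
  rw [Bool.eq_iff_iff, decide_eq_true_iff, decide_eq_true_iff]
  constructor
  · intro h c
    by_cases hc : c ∈ word.toList
    · have := h c hc; exact_mod_cast this
    · simp [List.count_eq_zero.mpr hc]
  · intro h c _
    exact_mod_cast h c
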